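-- pv_equiv track=rewrite | github.com/TopanOana/UniversityProjects | Semester1/Programming Fundamentals/A1/p3.py | largest_perfect_number
-- ===== SOURCE A (Python) =====
-- def perfect_number(number):
--     if number == 1:
--         return 0
--     sum_of_divisors=1
--     d=2
--     while d<=number/2:
--         if(number%d==0):
--             sum_of_divisors=sum_of_divisors+d
--         d=d+1
--     if sum_of_divisors==number:
--         result=1
--     else: result =0
--     return result
--
-- def largest_perfect_number(number):
--     result =0
--     number=number-1
--     while (result==0 and number>0):
--         if(perfect_number(number)==1):
--             result=number
--         else: number=number-1
--     return result
-- ===== SOURCE B (Python) =====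
-- def largest_perfect_number(number):
--     n = number - 1
--     while n > 0:
--         if n > 1:
--             s = 1
--             d = 2
--             while d * d <= n:
--                 if n % d == 0:
--                     s += d
--                     if d * d != n:
--                         s += n // d
--                 d += 1
--             if s == n:
--                 return n
--         n -= 1
--     return 0
-- ===== Notes on version B (the rewrite author's own statement) =====
-- stated objective: faster
-- what changed: B tests each candidate's perfection by scanning divisors only up to sqrt(n) and adding each divisor pair d and n//d (returning as soon as the perfect number is found), instead of A's scan of every d up to n/2.
import Mathlib
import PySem

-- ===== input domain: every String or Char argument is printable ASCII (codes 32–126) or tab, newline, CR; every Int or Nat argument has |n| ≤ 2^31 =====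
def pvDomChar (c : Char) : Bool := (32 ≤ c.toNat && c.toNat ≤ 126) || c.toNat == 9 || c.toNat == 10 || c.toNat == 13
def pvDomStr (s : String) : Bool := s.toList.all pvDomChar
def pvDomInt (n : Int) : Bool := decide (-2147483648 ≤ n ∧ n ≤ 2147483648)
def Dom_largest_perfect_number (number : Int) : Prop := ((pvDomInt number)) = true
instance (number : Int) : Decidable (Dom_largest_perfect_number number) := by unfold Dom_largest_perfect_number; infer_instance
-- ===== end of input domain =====

-- B replaces A's O(n)-per-candidate divisor scan (d up to n/2) by the O(√n) paired-divisor
-- scan (d up to √n, adding d and n//d); same downward search for the largest perfect number < input.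

-- ===== PORT A =====
-- inner while loop of perfect_number: 'd <= number/2' (exact float halving for |number| ≤ 2^31)
-- holds iff d ≤ number // 2, so the loop visits exactly range(2, number//2 + 1).
def perfect_number (number : Int) : Int :=
  if number = 1 then 0
  else
    let sum_of_divisors :=
      (PySem.List.pyRange 2 (PySem.Int.floordiv number 2 + 1) 1).foldl
        (fun s d => if PySem.Int.mod number d = 0 then s + d else s) 1
    if sum_of_divisors = number then 1 else 0

-- the while loop of largest_perfect_number: runs while number > 0, decrementing, so
-- (number)⁺ = number.toNat iterations of fuel suffice (invariant: fuel = number.toNat).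
def lpnLoopA : Nat → Int → Int
  | 0, _ => 0
  | k + 1, number => if perfect_number number = 1 then number else lpnLoopA k (number - 1)

def largest_perfect_number (number : Int) : Int :=
  lpnLoopA (number - 1).toNat (number - 1)

-- ===== PORT B =====
-- inner while loop of Source B: 'd*d <= n' for d ≥ 2 and n ≥ 0 holds iff d ≤ √n,
-- so the loop visits exactly range(2, isqrt(n) + 1).
def sum_divisors_alt (n : Int) : Int :=
  (PySem.List.pyRange 2 ((Nat.sqrt n.toNat : Int) + 1) 1).foldl
    (fun s d =>
      if PySem.Int.mod n d = 0 then
        if d * d ≠ n then s + d + PySem.Int.floordiv n d else s + d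
      else s) 1

def lpnLoopB : Nat → Int → Int
  | 0, _ => 0
  | k + 1, n =>
    if 1 < n then
      if sum_divisors_alt n = n then n else lpnLoopB k (n - 1)
    else lpnLoopB k (n - 1)

def largest_perfect_number_alt (number : Int) : Int :=
  lpnLoopB (number - 1).toNat (number - 1)

-- ===== PRECONDITION & SPEC =====
def Spec_largest_perfect_number (number : Int) (out : Int) : Prop := out = largest_perfect_number_alt number
instance (number : Int) (out : Int) : Decidable (Spec_largest_perfect_number number out) := by unfold Spec_largest_perfect_number; infer_instance

-- ===== CLAIM (what is proved, stated in full; the proofs are below) =====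
def Claim_equal_largest_perfect_number : Prop := ∀ (number : Int), Dom_largest_perfect_number number → Spec_largest_perfect_number number (largest_perfect_number number)

-- ===== LEMMAS AND PROOFS =====

-- sum over a unit-step pyRange is a Finset.Ico sum
lemma sum_map_pyRange_one (a b : Int) (f : Int → Int) :
    ((PySem.List.pyRange a b 1).map f).sum = ∑ d ∈ Finset.Ico a b, f d := by
  rw [← List.sum_toFinset _ (PySem.List.nodup_pyRange_one a b)]
  apply Finset.sum_congr
  · ext x
    simp [List.mem_toFinset, PySem.List.mem_pyRange_one, Finset.mem_Ico]
  · intros; rfl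

-- the two guarded folds as 1 + a Finset sum
lemma sumA_eq (n : Int) (_hn : 2 ≤ n) :
    (PySem.List.pyRange 2 (PySem.Int.floordiv n 2 + 1) 1).foldl
        (fun s d => if PySem.Int.mod n d = 0 then s + d else s) 1
      = 1 + ∑ d ∈ (Finset.Ico 2 (n / 2 + 1)).filter (· ∣ n), d := by
  have hf : (fun (s d : Int) => if PySem.Int.mod n d = 0 then s + d else s)
      = (fun s d => s + if d ∣ n then d else 0) := by
    funext s d
    by_cases h : d ∣ n
    · simp [h, (PySem.Int.mod_eq_zero_iff_dvd n d).mpr h]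
    · have hm : ¬ PySem.Int.mod n d = 0 := fun hm => h ((PySem.Int.mod_eq_zero_iff_dvd n d).mp hm)
      simp [h, hm]
  rw [hf, PySem.List.foldl_add, sum_map_pyRange_one,
    PySem.Int.floordiv_eq_ediv_of_pos (a := n) (by norm_num : (0:Int) < 2),
    Finset.sum_filter]

lemma sumB_eq (n : Int) (_hn : 2 ≤ n) :
    sum_divisors_alt n
      = 1 + ∑ d ∈ (Finset.Ico 2 ((Nat.sqrt n.toNat : Int) + 1)).filter (· ∣ n),
          (d + if d * d ≠ n then n / d else 0) := by
  unfold sum_divisors_alt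
  rw [PySem.List.foldl_congr_mem'
      (g := fun s d => s + if d ∣ n then d + (if d * d ≠ n then n / d else 0) else 0)
      (h := by
        intro d hd s
        have hd2 : 2 ≤ d := ((PySem.List.mem_pyRange_one).mp hd).1
        by_cases h : d ∣ n
        · have hm : PySem.Int.mod n d = 0 := (PySem.Int.mod_eq_zero_iff_dvd n d).mpr h
          have hfd : PySem.Int.floordiv n d = n / d :=
            PySem.Int.floordiv_eq_ediv_of_pos (by omega)
          by_cases hsq : d * d = n
          · simp [hm, h, hsq]
          · simp [hm, h, hsq, hfd]; ring
        · have hm : ¬ PySem.Int.mod n d = 0 :=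
            fun hm => h ((PySem.Int.mod_eq_zero_iff_dvd n d).mp hm)
          simp [h, hm]),
    PySem.List.foldl_add, sum_map_pyRange_one, Finset.sum_filter]

-- the paired-divisor identity: scanning to n/2 and scanning to √n with pairs agree
lemma pairing (n : Int) (hn : 2 ≤ n) :
    ∑ d ∈ (Finset.Ico 2 (n / 2 + 1)).filter (· ∣ n), d
      = ∑ d ∈ (Finset.Ico 2 ((Nat.sqrt n.toNat : Int) + 1)).filter (· ∣ n),
          (d + if d * d ≠ n then n / d else 0) := by
  set r : Int := (Nat.sqrt n.toNat : Int) with hrdef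
  have hr0 : 0 ≤ r := by positivity
  have htn : ((n.toNat : Nat) : Int) = n := Int.toNat_of_nonneg (by omega)
  have hrr : r * r ≤ n := by
    have h := Nat.sqrt_le n.toNat
    have h2 : ((Nat.sqrt n.toNat * Nat.sqrt n.toNat : Nat) : Int) ≤ ((n.toNat : Nat) : Int) := by
      exact_mod_cast h
    push_cast at h2; rw [htn] at h2; exact h2
  have hrs : n < (r + 1) * (r + 1) := by
    have h := Nat.lt_succ_sqrt n.toNat
    have h2 : ((n.toNat : Nat) : Int) < (((Nat.sqrt n.toNat).succ * (Nat.sqrt n.toNat).succ : Nat) : Int) := by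
      exact_mod_cast h
    push_cast at h2; rw [htn] at h2; linarith
  have hr1 : 1 ≤ r := by nlinarith
  have key : ∀ d : Int, d ∣ n → d * (n / d) = n := fun d h => Int.mul_ediv_cancel' h
  have kpos : ∀ d : Int, 2 ≤ d → d ∣ n → 1 ≤ n / d := by
    intro d hd hdv
    by_contra hcon
    push_neg at hcon
    nlinarith [key d hdv]
  have small2 : ∀ d : Int, 2 ≤ d → d ≤ r → d ∣ n → 2 ≤ n / d := by
    intro d hd hdr hdv
    have h1 := kpos d hd hdv
    by_contra hcon
    push_neg at hcon
    have hk1 : n / d = 1 := by omega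
    have := key d hdv
    rw [hk1, mul_one] at this
    nlinarith
  have hdvd_k : ∀ d : Int, d ∣ n → (n / d) ∣ n := by
    intro d hdv
    exact ⟨d, by linarith [key d hdv, mul_comm (n / d) d]⟩
  have hinv : ∀ d : Int, 2 ≤ d → d ∣ n → n / (n / d) = d := by
    intro d hd hdv
    have hk := key d hdv
    calc n / (n / d) = d * (n / d) / (n / d) := by rw [hk]
    _ = d := Int.mul_ediv_cancel d (by have := kpos d hd hdv; omega)
  have hsplit := Finset.sum_filter_add_sum_filter_not
    ((Finset.Ico 2 (n / 2 + 1)).filter (· ∣ n)) (fun d => d ≤ r) (fun d => d)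
  have hSBeq : ((Finset.Ico 2 (n / 2 + 1)).filter (· ∣ n)).filter (fun d => d ≤ r)
      = (Finset.Ico 2 (r + 1)).filter (· ∣ n) := by
    ext d
    simp only [Finset.mem_filter, Finset.mem_Ico]
    constructor
    · rintro ⟨⟨⟨h2, _⟩, hdv⟩, hdr⟩
      exact ⟨⟨h2, by omega⟩, hdv⟩
    · rintro ⟨⟨h2, hrb⟩, hdv⟩
      have hk2 : 2 ≤ n / d := small2 d h2 (by omega) hdv
      have hq : d ≤ n / 2 := (Int.le_ediv_iff_mul_le (by norm_num)).mpr
        (by nlinarith [key d hdv])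
      exact ⟨⟨⟨h2, by omega⟩, hdv⟩, by omega⟩
  have hbij : ∑ d ∈ ((Finset.Ico 2 (n / 2 + 1)).filter (· ∣ n)).filter (fun d => ¬ d ≤ r), d
      = ∑ e ∈ ((Finset.Ico 2 (r + 1)).filter (· ∣ n)).filter (fun e => e * e ≠ n), n / e := by
    refine Finset.sum_nbij' (i := fun d => n / d) (j := fun e => n / e)
      ?_ ?_ ?_ ?_ ?_
    · intro d hd
      simp only [Finset.mem_filter, Finset.mem_Ico] at hd ⊢
      obtain ⟨⟨⟨h2, hq⟩, hdv⟩, hdr⟩ := hd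
      push_neg at hdr
      have hq2 : d * 2 ≤ n := (Int.le_ediv_iff_mul_le (by norm_num)).mp (by omega)
      have hk := key d hdv
      have hk2 : 2 ≤ n / d := by nlinarith
      have hkr : n / d ≤ r := by nlinarith
      refine ⟨⟨⟨hk2, by omega⟩, hdvd_k d hdv⟩, ?_⟩
      intro hsq
      nlinarith
    · intro e he
      simp only [Finset.mem_filter, Finset.mem_Ico] at he ⊢
      obtain ⟨⟨⟨h2, hrb⟩, hdv⟩, hsq⟩ := he
      have hk := key e hdv
      have hk2 : 2 ≤ n / e := small2 e h2 (by omega) hdv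
      have hkq : n / e ≤ n / 2 := (Int.le_ediv_iff_mul_le (by norm_num)).mpr (by nlinarith)
      set k := n / e with hkdef
      have hdk : k ∣ n := by rw [hkdef]; exact hdvd_k e hdv
      have hkr : ¬ k ≤ r := by
        intro hcon
        have h1 : e ≤ r := by omega
        have ha : 0 ≤ (r - e) * k := mul_nonneg (by omega) (by omega)
        have hb : 0 ≤ r * (r - k) := mul_nonneg (by omega) (by omega)
        have hsum : (r - e) * k + r * (r - k) = r * r - n := by linear_combination -hk
        have ha0 : (r - e) * k = 0 := by linarith
        have hb0 : r * (r - k) = 0 := by linarith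
        have hke : k = r := by
          rcases mul_eq_zero.mp hb0 with h | h
          · omega
          · omega
        have her : e = r := by
          rcases mul_eq_zero.mp ha0 with h | h
          · omega
          · omega
        exact hsq (by linear_combination hk + e * her - e * hke)
      exact ⟨⟨⟨by omega, by omega⟩, hdk⟩, hkr⟩
    · intro d hd
      simp only [Finset.mem_filter, Finset.mem_Ico] at hd
      exact hinv d hd.1.1.1 hd.1.2
    · intro e he
      simp only [Finset.mem_filter, Finset.mem_Ico] at he
      exact hinv e he.1.1.1 he.1.2
    · intro d hd
      simp only [Finset.mem_filter, Finset.mem_Ico] at hd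
      exact (hinv d hd.1.1.1 hd.1.2).symm
  calc ∑ d ∈ (Finset.Ico 2 (n / 2 + 1)).filter (· ∣ n), d
      = ∑ d ∈ ((Finset.Ico 2 (n / 2 + 1)).filter (· ∣ n)).filter (fun d => d ≤ r), d
        + ∑ d ∈ ((Finset.Ico 2 (n / 2 + 1)).filter (· ∣ n)).filter (fun d => ¬ d ≤ r), d :=
        hsplit.symm
    _ = ∑ d ∈ (Finset.Ico 2 (r + 1)).filter (· ∣ n), d
        + ∑ e ∈ ((Finset.Ico 2 (r + 1)).filter (· ∣ n)).filter (fun e => e * e ≠ n), n / e := by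
        rw [hSBeq, hbij]
    _ = ∑ d ∈ (Finset.Ico 2 (r + 1)).filter (· ∣ n), (d + if d * d ≠ n then n / d else 0) := by
        rw [Finset.sum_add_distrib]
        congr 1
        exact Finset.sum_filter _ _

-- the two perfection tests agree on every positive candidate
lemma step_eq (n : Int) (hn : 0 < n) :
    (perfect_number n = 1) ↔ (1 < n ∧ sum_divisors_alt n = n) := by
  by_cases h1 : n = 1
  · subst h1; simp [perfect_number]
  · have hn2 : 2 ≤ n := by omega
    have hAB : (PySem.List.pyRange 2 (PySem.Int.floordiv n 2 + 1) 1).foldl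
        (fun s d => if PySem.Int.mod n d = 0 then s + d else s) 1 = sum_divisors_alt n := by
      rw [sumA_eq n hn2, sumB_eq n hn2, pairing n hn2]
    unfold perfect_number
    rw [if_neg h1, hAB]
    constructor
    · intro h
      refine ⟨by omega, ?_⟩
      by_contra hne
      simp only [if_neg hne] at h
      exact absurd h (by decide)
    · intro ⟨_, h⟩
      simp [h]

lemma loop_eq : ∀ (k : Nat) (n : Int), n.toNat = k → lpnLoopA k n = lpnLoopB k n := by
  intro k
  induction k with
  | zero => intro n _; rfl
  | succ k ih =>
    intro n hk
    have hn : 0 < n := by omega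
    by_cases hp : perfect_number n = 1
    · have h := (step_eq n hn).mp hp
      simp [lpnLoopA, lpnLoopB, hp, h.1, h.2]
    · have hrec : lpnLoopA k (n - 1) = lpnLoopB k (n - 1) := ih _ (by omega)
      by_cases h1 : 1 < n
      · have hs : ¬ sum_divisors_alt n = n := fun hs => hp ((step_eq n hn).mpr ⟨h1, hs⟩)
        simp [lpnLoopA, lpnLoopB, hp, h1, hs, hrec]
      · simp [lpnLoopA, lpnLoopB, hp, h1, hrec]

-- ===== VERDICT (by name: the statement is the Claim_ definition above) =====
theorem largest_perfect_number_spec : Claim_equal_largest_perfect_number := by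
  intro number _
  unfold Spec_largest_perfect_number largest_perfect_number largest_perfect_number_alt
  exact loop_eq _ _ rfl
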